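-- pv_equiv track=rewrite | github.com/felixy12/KmerProject | scripts/getKmerWeights.py | generateKmer
-- ===== SOURCE A (Python) =====
-- def generateKmer(kmerList, k):
--     NTList = ['T','C','G','A']
--     if(k==0):
--         return kmerList
--     kmerListNew = list()
--     for kmer in kmerList:
--         for NT in NTList:
--             kmerListNew.append(kmer+NT)
--     return generateKmer(kmerListNew, k-1)
-- ===== SOURCE B (Python) =====
-- def generateKmer(kmerList, k):
--     NTList = ['T', 'C', 'G', 'A']
--     result = kmerList
--     for _ in range(k):
--         result = [kmer + NT for kmer in result for NT in NTList]
--     return result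
-- ===== Notes on version B (the rewrite author's own statement) =====
-- stated objective: simpler
-- what changed: Replaced the tail recursion (rebuilding the list with nested append loops and recursing with k-1) by a single iterative loop that rebuilds the list k times with a comprehension.
import Mathlib
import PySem

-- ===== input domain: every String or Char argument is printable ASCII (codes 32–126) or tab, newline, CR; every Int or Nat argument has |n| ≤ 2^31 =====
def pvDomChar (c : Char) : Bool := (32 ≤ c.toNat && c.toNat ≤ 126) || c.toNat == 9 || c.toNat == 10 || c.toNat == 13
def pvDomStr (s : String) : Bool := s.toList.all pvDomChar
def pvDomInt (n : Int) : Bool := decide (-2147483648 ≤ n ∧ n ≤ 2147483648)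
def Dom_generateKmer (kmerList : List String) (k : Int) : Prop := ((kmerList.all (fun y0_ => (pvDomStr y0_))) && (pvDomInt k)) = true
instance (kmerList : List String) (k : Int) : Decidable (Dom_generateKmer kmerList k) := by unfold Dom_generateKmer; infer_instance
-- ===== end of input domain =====

-- B replaces A's tail recursion by a single iterative loop (k rebuilds of the list); same values, simpler shape.

-- ===== PORT A =====
-- literal port of A; the 'k < 0' branch only makes the recursion total (A diverges there; outside Pre_)
def generateKmer (kmerList : List String) (k : Int) : List String :=
  let NTList : List String := ["T", "C", "G", "A"]
  if k = 0 then kmerList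
  else if k < 0 then kmerList
  else
    let kmerListNew :=
      kmerList.foldl (fun acc kmer =>
        NTList.foldl (fun acc2 nt => acc2 ++ [kmer ++ nt]) acc) []
    generateKmer kmerListNew (k - 1)
termination_by k.toNat
decreasing_by omega

-- ===== PORT B =====
def generateKmer_alt (kmerList : List String) (k : Int) : List String :=
  let NTList : List String := ["T", "C", "G", "A"]
  (PySem.List.pyRange 0 k 1).foldl
    (fun result _ => result.flatMap (fun kmer => NTList.map (fun nt => kmer ++ nt)))
    kmerList

-- ===== PRECONDITION & SPEC =====
-- Pre_ excludes negative k, on which A infinitely recurses (RecursionError).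
def Pre_generateKmer (kmerList : List String) (k : Int) : Prop := 0 ≤ k
instance (kmerList : List String) (k : Int) : Decidable (Pre_generateKmer kmerList k) := by
  unfold Pre_generateKmer; infer_instance
def pvWitness_generateKmer : List String × Int := (["TA", "GG"], 2)

def Spec_generateKmer (kmerList : List String) (k : Int) (out : List String) : Prop :=
  out = generateKmer_alt kmerList k
instance (kmerList : List String) (k : Int) (out : List String) : Decidable (Spec_generateKmer kmerList k out) := by
  unfold Spec_generateKmer; infer_instance

-- ===== CLAIM (what is proved, stated in full; the proofs are below) =====
def Claim_equal_generateKmer : Prop := ∀ (kmerList : List String) (k : Int), Dom_generateKmer kmerList k → Pre_generateKmer kmerList k → Spec_generateKmer kmerList k (generateKmer kmerList k)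

-- ===== LEMMAS AND PROOFS =====

-- one rebuilding step shared by both characterisations
def kmerStep (xs : List String) : List String :=
  xs.flatMap (fun kmer => (["T", "C", "G", "A"] : List String).map (fun nt => kmer ++ nt))

theorem foldl_ignore_eq_iterate {α β : Type} (g : α → α) :
    ∀ (l : List β) (init : α), l.foldl (fun r _ => g r) init = g^[l.length] init := by
  intro l
  induction l with
  | nil => intro init; rfl
  | cons x t ih =>
      intro init
      simp [List.foldl, ih, Function.iterate_succ_apply]

theorem generateKmer_alt_eq_iterate (xs : List String) (k : Int) :
    generateKmer_alt xs k = kmerStep^[k.toNat] xs := by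
  show List.foldl (fun result _ => kmerStep result) xs (PySem.List.pyRange 0 k 1) = _
  rw [foldl_ignore_eq_iterate (g := kmerStep) (PySem.List.pyRange 0 k 1) xs]
  rw [PySem.List.length_pyRange_one]
  norm_num

theorem generateKmer_eq_iterate (k : Int) (hk : 0 ≤ k) :
    ∀ (xs : List String), generateKmer xs k = kmerStep^[k.toNat] xs := by
  induction k, hk using Int.le_induction with
  | base =>
      intro xs
      unfold generateKmer
      simp
  | succ n hn ih =>
      intro xs
      rw [generateKmer]
      have h0 : ¬ (n + 1 = 0) := by omega
      have h1 : ¬ (n + 1 < 0) := by omega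
      simp only [h0, h1, if_false]
      have hinner :
          xs.foldl (fun acc kmer =>
            (["T", "C", "G", "A"] : List String).foldl (fun acc2 nt => acc2 ++ [kmer ++ nt]) acc) [] =
            kmerStep xs := by
        have : ∀ (acc : List String) (kmer : String),
            (["T", "C", "G", "A"] : List String).foldl (fun acc2 nt => acc2 ++ [kmer ++ nt]) acc =
              acc ++ (["T", "C", "G", "A"] : List String).map (fun nt => kmer ++ nt) := by
          intro acc kmer
          exact PySem.List.foldl_append_singleton_eq_map _ _ _
        simp only [this]
        simpa [kmerStep] using
          PySem.List.foldl_append_eq_flatMap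
            (fun kmer => (["T", "C", "G", "A"] : List String).map (fun nt => kmer ++ nt)) xs []
      rw [hinner]
      have hsub : n + 1 - 1 = n := by ring
      rw [hsub, ih (kmerStep xs)]
      have hn' : (n + 1).toNat = n.toNat + 1 := by omega
      rw [hn', Function.iterate_succ_apply]

-- ===== VERDICT (by name: the statement is the Claim_ definition above) =====
theorem generateKmer_spec : Claim_equal_generateKmer := by
  intro kmerList k _ hpre
  unfold Spec_generateKmer
  rw [generateKmer_eq_iterate k hpre kmerList, generateKmer_alt_eq_iterate]
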